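-- pv_equiv track=rewrite | github.com/brmh/AstroMCP | api/core/ashtakavarga.py | get_bhinnashtakavarga
-- ===== SOURCE A (Python) =====
-- from typing import Dict, List, Any
--
-- PLANET_BENEFIC_HOUSES = {
--     "sun": [1, 2, 4, 7, 8, 9, 10, 11],      # Sun gives bindus to these houses
--     "moon": [1, 3, 6, 7, 8, 10, 11],         # Moon gives bindus to these houses
--     "mars": [1, 3, 6, 10, 11],               # Mars gives bindus to these houses
--     "mercury": [1, 3, 5, 6, 7, 9, 10, 11],  # Mercury gives bindus to these houses
--     "jupiter": [1, 2, 3, 4, 7, 8, 10, 11],  # Jupiter gives bindus to these houses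
--     "venus": [1, 2, 3, 4, 5, 8, 9, 11],     # Venus gives bindus to these houses
--     "saturn": [1, 3, 6, 11],                 # Saturn gives bindus to these houses
--     "ascendant": [1, 2, 3, 4, 7, 8, 10, 11]  # Lagna gives bindus to these houses
-- }
--
-- def get_planet_sign_index(positions: Dict, planet: str) -> int:
--     """Get the sign index (0-11) where a planet is located."""
--     planet_data = positions.get(planet, {})
--     if "sign_index" in planet_data:
--         return planet_data["sign_index"]
--     else:
--         # Fallback: calculate from longitude
--         longitude = planet_data.get("longitude", 0)
--         return int(longitude / 30) % 12
--
-- def calculate_bindus_for_contributor(contributor_pos: int, benefic_houses: List[int]) -> List[int]: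
--     """
--     Calculate bindus (0 or 1) for each zodiac sign from a single contributor.
--     contributor_pos: sign index where contributor planet is located (0-11)
--     benefic_houses: house numbers (1-12) where contributor gives bindus
--     Returns: list of 12 values (0 or 1) for each sign
--     """
--     bindus = [0] * 12
--     for house in benefic_houses:
--         # Convert house number to sign index (house 1 = contributor's position)
--         sign_idx = (contributor_pos + house - 1) % 12
--         bindus[sign_idx] = 1
--     return bindus
--
-- def get_bhinnashtakavarga(positions: Dict, houses: Dict) -> Dict[str, List[int]]:
--     """
--     Calculate Bhinnashtakavarga (individual Ashtakavarga) for each of 7 planets.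
--     Each planet gets points from 8 contributors (7 planets + Ascendant).
--     Returns: dict mapping planet name to list of 12 bindu counts (0-8 per sign)
--     """
--     # Get positions of all 7 planets + Ascendant
--     contributors = ["sun", "moon", "mars", "mercury", "jupiter", "venus", "saturn"]
--
--     # Get sign positions
--     contributor_positions = {}
--     for planet in contributors:
--         contributor_positions[planet] = get_planet_sign_index(positions, planet)
--
--     # Add Ascendant position
--     asc_longitude = houses.get("ascendant", 0)
--     contributor_positions["ascendant"] = int(asc_longitude / 30) % 12
--
--     # Calculate Bhinnashtakavarga for each of the 7 planets
--     results = {}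
--
--     for planet in contributors:
--         planet_bindus = [0] * 12  # Each sign can get 0-8 bindus total
--
--         # Each contributor gives 0 or 1 bindu to each sign
--         for contributor, contrib_pos in contributor_positions.items():
--             benefic_houses = PLANET_BENEFIC_HOUSES[contributor]
--             contributor_bindus = calculate_bindus_for_contributor(contrib_pos, benefic_houses)
--
--             # Add contributor's bindus to planet's total
--             for sign_idx in range(12):
--                 planet_bindus[sign_idx] += contributor_bindus[sign_idx]
--
--         results[planet] = planet_bindus
--
--     return results
-- ===== SOURCE B (Python) =====
-- PLANET_BENEFIC_HOUSES = {
--     "sun": [1, 2, 4, 7, 8, 9, 10, 11],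
--     "moon": [1, 3, 6, 7, 8, 10, 11],
--     "mars": [1, 3, 6, 10, 11],
--     "mercury": [1, 3, 5, 6, 7, 9, 10, 11],
--     "jupiter": [1, 2, 3, 4, 7, 8, 10, 11],
--     "venus": [1, 2, 3, 4, 5, 8, 9, 11],
--     "saturn": [1, 3, 6, 11],
--     "ascendant": [1, 2, 3, 4, 7, 8, 10, 11]
-- }
--
-- def get_bhinnashtakavarga(positions, houses):
--     """Gather formulation: one shared 12-sign bindu vector, computed by counting,
--     per sign, the contributors whose benefic-house set contains that sign's house
--     offset from the contributor; every planet receives a copy of that vector."""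
--     contributors = ["sun", "moon", "mars", "mercury", "jupiter", "venus", "saturn"]
--     pos = {}
--     for planet in contributors:
--         data = positions.get(planet, {})
--         if "sign_index" in data:
--             pos[planet] = data["sign_index"]
--         else:
--             pos[planet] = int(data.get("longitude", 0) / 30) % 12
--     pos["ascendant"] = int(houses.get("ascendant", 0) / 30) % 12
--     benefic = {c: set(h) for c, h in PLANET_BENEFIC_HOUSES.items()}
--     vector = [sum(1 for c, p in pos.items() if ((s - p) % 12) + 1 in benefic[c])
--               for s in range(12)]
--     return {planet: list(vector) for planet in contributors}
-- ===== Notes on version B (the rewrite author's own statement) =====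
-- stated objective: simpler
-- what changed: A scatter-fills a fresh 12-slot bindu list per contributor and re-accumulates the whole 8-contributor sum separately for each of the 7 planets; B inverts this into a single gather pass that, for each sign, counts the contributors whose benefic-house set contains that sign's offset house, computes that shared 12-vector once, and maps every planet to a copy of it.
import Mathlib
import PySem

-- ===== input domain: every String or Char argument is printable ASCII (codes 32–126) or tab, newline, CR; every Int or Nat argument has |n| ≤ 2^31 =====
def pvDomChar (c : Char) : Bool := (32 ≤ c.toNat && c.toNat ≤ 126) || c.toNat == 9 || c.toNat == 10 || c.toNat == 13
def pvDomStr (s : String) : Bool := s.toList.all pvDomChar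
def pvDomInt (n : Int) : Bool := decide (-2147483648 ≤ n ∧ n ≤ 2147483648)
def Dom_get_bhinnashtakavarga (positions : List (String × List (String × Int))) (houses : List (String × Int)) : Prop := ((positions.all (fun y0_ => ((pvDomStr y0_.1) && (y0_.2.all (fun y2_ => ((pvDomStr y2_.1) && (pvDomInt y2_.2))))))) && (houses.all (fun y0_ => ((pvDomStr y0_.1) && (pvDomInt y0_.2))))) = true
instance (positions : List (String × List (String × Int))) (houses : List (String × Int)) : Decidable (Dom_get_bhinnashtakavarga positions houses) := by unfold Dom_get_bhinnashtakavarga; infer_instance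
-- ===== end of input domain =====

-- B replaces A's per-planet scatter-fill of bindu lists by one shared per-sign gather/count
-- vector copied to every planet (objective: simpler).




-- ===== PORT A =====
def PLANET_BENEFIC_HOUSES : PySem.Dict String (List Int) :=
  PySem.Dict.mk
    [("sun", [1, 2, 4, 7, 8, 9, 10, 11]),
     ("moon", [1, 3, 6, 7, 8, 10, 11]),
     ("mars", [1, 3, 6, 10, 11]),
     ("mercury", [1, 3, 5, 6, 7, 9, 10, 11]),
     ("jupiter", [1, 2, 3, 4, 7, 8, 10, 11]),
     ("venus", [1, 2, 3, 4, 5, 8, 9, 11]),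
     ("saturn", [1, 3, 6, 11]),
     ("ascendant", [1, 2, 3, 4, 7, 8, 10, 11])]

def get_planet_sign_index (positions : List (String × List (String × Int))) (planet : String) : Int :=
  let planet_data := PySem.Dict.getD (PySem.Dict.mk positions) planet []
  match PySem.Dict.get? (PySem.Dict.mk planet_data) "sign_index" with
  | some v => v
  | none =>
    let longitude := PySem.Dict.getD (PySem.Dict.mk planet_data) "longitude" 0
    -- int(longitude / 30): truncdiv is exact for |longitude| < 2^53
    PySem.Int.mod (PySem.Int.truncdiv longitude 30) 12

def calculate_bindus_for_contributor (contributor_pos : Int) (benefic_houses : List Int) : List Int :=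
  benefic_houses.foldl
    (fun bindus house =>
      -- sign_idx = (contributor_pos + house - 1) % 12 is always in [0, 12), so .toNat is exact
      bindus.set (PySem.Int.mod (contributor_pos + house - 1) 12).toNat 1)
    (List.replicate 12 0)

def get_bhinnashtakavarga (positions : List (String × List (String × Int))) (houses : List (String × Int)) : List (String × List Int) :=
  let contributors : List String := ["sun", "moon", "mars", "mercury", "jupiter", "venus", "saturn"]
  let contributor_positions : PySem.Dict String Int :=
    contributors.foldl
      (fun d planet => PySem.Dict.insert d planet (get_planet_sign_index positions planet))
      PySem.Dict.empty
  let asc_longitude := PySem.Dict.getD (PySem.Dict.mk houses) "ascendant" 0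
  let contributor_positions :=
    PySem.Dict.insert contributor_positions "ascendant"
      (PySem.Int.mod (PySem.Int.truncdiv asc_longitude 30) 12)
  let results : PySem.Dict String (List Int) :=
    contributors.foldl
      (fun results planet =>
        let planet_bindus : List Int :=
          contributor_positions.items.foldl
            (fun planet_bindus cp =>
              -- PLANET_BENEFIC_HOUSES[contributor]: every contributor key is present, so getD is exact here
              let benefic_houses := PySem.Dict.getD PLANET_BENEFIC_HOUSES cp.1 []
              let contributor_bindus := calculate_bindus_for_contributor cp.2 benefic_houses
              (PySem.List.pyRange 0 12 1).foldl
                (fun pb sign_idx =>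
                  -- planet_bindus[sign_idx] += contributor_bindus[sign_idx]; indices 0..11 always in range
                  pb.set sign_idx.toNat (pb.getD sign_idx.toNat 0 + contributor_bindus.getD sign_idx.toNat 0))
                planet_bindus)
            (List.replicate 12 0)
        PySem.Dict.insert results planet planet_bindus)
      PySem.Dict.empty
  results.items

-- ===== PORT B =====
-- Source B re-declares the same module constant PLANET_BENEFIC_HOUSES; the Lean port shares the one above
def get_bhinnashtakavarga_alt (positions : List (String × List (String × Int))) (houses : List (String × Int)) : List (String × List Int) :=
  let contributors : List String := ["sun", "moon", "mars", "mercury", "jupiter", "venus", "saturn"]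
  let pos : PySem.Dict String Int :=
    contributors.foldl
      (fun d planet =>
        let data := PySem.Dict.getD (PySem.Dict.mk positions) planet []
        let v : Int :=
          match PySem.Dict.get? (PySem.Dict.mk data) "sign_index" with
          | some v => v
          | none =>
            PySem.Int.mod (PySem.Int.truncdiv (PySem.Dict.getD (PySem.Dict.mk data) "longitude" 0) 30) 12
        PySem.Dict.insert d planet v)
      PySem.Dict.empty
  let pos :=
    PySem.Dict.insert pos "ascendant"
      (PySem.Int.mod (PySem.Int.truncdiv (PySem.Dict.getD (PySem.Dict.mk houses) "ascendant" 0) 30) 12)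
  let benefic : PySem.Dict String (PySem.Set Int) :=
    PLANET_BENEFIC_HOUSES.items.foldl
      (fun d cp => PySem.Dict.insert d cp.1 (PySem.Set.ofList cp.2))
      PySem.Dict.empty
  let vector : List Int :=
    (PySem.List.pyRange 0 12 1).map
      (fun s =>
        pos.items.foldl
          (fun acc cp =>
            if PySem.Int.mod (s - cp.2) 12 + 1 ∈ PySem.Dict.getD benefic cp.1 [] then acc + 1 else acc)
          0)
  -- {planet: list(vector) for planet in contributors}; list() copies, which is the identity here
  (contributors.foldl (fun d planet => PySem.Dict.insert d planet vector) PySem.Dict.empty).items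

-- ===== PRECONDITION & SPEC =====
def Spec_get_bhinnashtakavarga (positions : List (String × List (String × Int))) (houses : List (String × Int)) (out : List (String × List Int)) : Prop := out = get_bhinnashtakavarga_alt positions houses
instance (positions : List (String × List (String × Int))) (houses : List (String × Int)) (out : List (String × List Int)) : Decidable (Spec_get_bhinnashtakavarga positions houses out) := by unfold Spec_get_bhinnashtakavarga; infer_instance

-- ===== CLAIM (what is proved, stated in full; the proofs are below) =====
def Claim_equal_get_bhinnashtakavarga : Prop := ∀ (positions : List (String × List (String × Int))) (houses : List (String × Int)), Dom_get_bhinnashtakavarga positions houses → Spec_get_bhinnashtakavarga positions houses (get_bhinnashtakavarga positions houses)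

-- ===== LEMMAS AND PROOFS =====

-- the 8 contributor items as a list of (name, sign position)
def pvItems (v1 v2 v3 v4 v5 v6 v7 v8 : Int) : List (String × Int) :=
  [("sun", v1), ("moon", v2), ("mars", v3), ("mercury", v4),
   ("jupiter", v5), ("venus", v6), ("saturn", v7), ("ascendant", v8)]

-- A's per-planet bindu list as a function of the 8 contributor positions
def pvAB (v1 v2 v3 v4 v5 v6 v7 v8 : Int) : List Int :=
  (pvItems v1 v2 v3 v4 v5 v6 v7 v8).foldl
    (fun planet_bindus cp =>
      (PySem.List.pyRange 0 12 1).foldl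
        (fun pb i =>
          pb.set i.toNat (pb.getD i.toNat 0 +
            (calculate_bindus_for_contributor cp.2 (PySem.Dict.getD PLANET_BENEFIC_HOUSES cp.1 [])).getD i.toNat 0))
        planet_bindus)
    (List.replicate 12 0)

-- B's benefic dict, fully evaluated
def pvBeneficLit : PySem.Dict String (PySem.Set Int) :=
  PySem.Dict.mk
    [("sun", [1, 2, 4, 7, 8, 9, 10, 11]),
     ("moon", [1, 3, 6, 7, 8, 10, 11]),
     ("mars", [1, 3, 6, 10, 11]),
     ("mercury", [1, 3, 5, 6, 7, 9, 10, 11]),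
     ("jupiter", [1, 2, 3, 4, 7, 8, 10, 11]),
     ("venus", [1, 2, 3, 4, 5, 8, 9, 11]),
     ("saturn", [1, 3, 6, 11]),
     ("ascendant", [1, 2, 3, 4, 7, 8, 10, 11])]

-- B's shared vector as a function of the 8 contributor positions
def pvV (v1 v2 v3 v4 v5 v6 v7 v8 : Int) : List Int :=
  (PySem.List.pyRange 0 12 1).map
    (fun s =>
      (pvItems v1 v2 v3 v4 v5 v6 v7 v8).foldl
        (fun acc cp =>
          if PySem.Int.mod (s - cp.2) 12 + 1 ∈ PySem.Dict.getD pvBeneficLit cp.1 [] then acc + 1 else acc)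
        0)

def pvAsc (houses : List (String × Int)) : Int :=
  PySem.Int.mod (PySem.Int.truncdiv (PySem.Dict.getD (PySem.Dict.mk houses) "ascendant" 0) 30) 12

lemma pv_A_shape (P : List (String × List (String × Int))) (H : List (String × Int)) :
    get_bhinnashtakavarga P H =
      (["sun", "moon", "mars", "mercury", "jupiter", "venus", "saturn"] : List String).map
        (fun pl => (pl, pvAB (get_planet_sign_index P "sun") (get_planet_sign_index P "moon")
          (get_planet_sign_index P "mars") (get_planet_sign_index P "mercury")
          (get_planet_sign_index P "jupiter") (get_planet_sign_index P "venus")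
          (get_planet_sign_index P "saturn") (pvAsc H))) := rfl

lemma pv_B_shape (P : List (String × List (String × Int))) (H : List (String × Int)) :
    get_bhinnashtakavarga_alt P H =
      (["sun", "moon", "mars", "mercury", "jupiter", "venus", "saturn"] : List String).map
        (fun pl => (pl, pvV (get_planet_sign_index P "sun") (get_planet_sign_index P "moon")
          (get_planet_sign_index P "mars") (get_planet_sign_index P "mercury")
          (get_planet_sign_index P "jupiter") (get_planet_sign_index P "venus")
          (get_planet_sign_index P "saturn") (pvAsc H))) := rfl

lemma pv_mod_shift (s p : Int) :
    PySem.Int.mod (s - p) 12 = PySem.Int.mod (s - PySem.Int.mod p 12) 12 := by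
  rw [PySem.Int.mod_eq_emod_of_pos (by norm_num), PySem.Int.mod_eq_emod_of_pos (by norm_num),
    PySem.Int.mod_eq_emod_of_pos (by norm_num)]
  omega

lemma pv_mod_shift2 (p h : Int) :
    PySem.Int.mod (p + h - 1) 12 = PySem.Int.mod (PySem.Int.mod p 12 + h - 1) 12 := by
  rw [PySem.Int.mod_eq_emod_of_pos (by norm_num), PySem.Int.mod_eq_emod_of_pos (by norm_num),
    PySem.Int.mod_eq_emod_of_pos (by norm_num)]
  omega

lemma pv_scatter_mod (p : Int) (bh : List Int) :
    calculate_bindus_for_contributor p bh = calculate_bindus_for_contributor (PySem.Int.mod p 12) bh := by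
  unfold calculate_bindus_for_contributor
  apply PySem.List.foldl_congr_mem
  intro acc h _
  rw [pv_mod_shift2]


lemma pv_scatter_sun (p : Int) :
    calculate_bindus_for_contributor p ([1, 2, 4, 7, 8, 9, 10, 11] : List Int) =
      List.map (fun s => if PySem.Int.mod (s - p) 12 + 1 ∈ ([1, 2, 4, 7, 8, 9, 10, 11] : List Int) then (1 : Int) else 0)
        (PySem.List.pyRange 0 12 1) := by
  rw [pv_scatter_mod]
  have h0 : 0 ≤ PySem.Int.mod p 12 := PySem.Int.mod_nonneg p (by norm_num)
  have h1 : PySem.Int.mod p 12 < 12 := PySem.Int.mod_lt p (by norm_num)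
  have hmap :
      List.map (fun s => if PySem.Int.mod (s - p) 12 + 1 ∈ ([1, 2, 4, 7, 8, 9, 10, 11] : List Int) then (1 : Int) else 0)
        (PySem.List.pyRange 0 12 1) =
      List.map (fun s => if PySem.Int.mod (s - PySem.Int.mod p 12) 12 + 1 ∈ ([1, 2, 4, 7, 8, 9, 10, 11] : List Int) then (1 : Int) else 0)
        (PySem.List.pyRange 0 12 1) :=
    List.map_congr_left (fun s _ => by rw [pv_mod_shift])
  rw [hmap]
  generalize PySem.Int.mod p 12 = q at h0 h1
  interval_cases q <;> decide

lemma pv_scatter_moon (p : Int) :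
    calculate_bindus_for_contributor p ([1, 3, 6, 7, 8, 10, 11] : List Int) =
      List.map (fun s => if PySem.Int.mod (s - p) 12 + 1 ∈ ([1, 3, 6, 7, 8, 10, 11] : List Int) then (1 : Int) else 0)
        (PySem.List.pyRange 0 12 1) := by
  rw [pv_scatter_mod]
  have h0 : 0 ≤ PySem.Int.mod p 12 := PySem.Int.mod_nonneg p (by norm_num)
  have h1 : PySem.Int.mod p 12 < 12 := PySem.Int.mod_lt p (by norm_num)
  have hmap :
      List.map (fun s => if PySem.Int.mod (s - p) 12 + 1 ∈ ([1, 3, 6, 7, 8, 10, 11] : List Int) then (1 : Int) else 0)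
        (PySem.List.pyRange 0 12 1) =
      List.map (fun s => if PySem.Int.mod (s - PySem.Int.mod p 12) 12 + 1 ∈ ([1, 3, 6, 7, 8, 10, 11] : List Int) then (1 : Int) else 0)
        (PySem.List.pyRange 0 12 1) :=
    List.map_congr_left (fun s _ => by rw [pv_mod_shift])
  rw [hmap]
  generalize PySem.Int.mod p 12 = q at h0 h1
  interval_cases q <;> decide

lemma pv_scatter_mars (p : Int) :
    calculate_bindus_for_contributor p ([1, 3, 6, 10, 11] : List Int) =
      List.map (fun s => if PySem.Int.mod (s - p) 12 + 1 ∈ ([1, 3, 6, 10, 11] : List Int) then (1 : Int) else 0)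
        (PySem.List.pyRange 0 12 1) := by
  rw [pv_scatter_mod]
  have h0 : 0 ≤ PySem.Int.mod p 12 := PySem.Int.mod_nonneg p (by norm_num)
  have h1 : PySem.Int.mod p 12 < 12 := PySem.Int.mod_lt p (by norm_num)
  have hmap :
      List.map (fun s => if PySem.Int.mod (s - p) 12 + 1 ∈ ([1, 3, 6, 10, 11] : List Int) then (1 : Int) else 0)
        (PySem.List.pyRange 0 12 1) =
      List.map (fun s => if PySem.Int.mod (s - PySem.Int.mod p 12) 12 + 1 ∈ ([1, 3, 6, 10, 11] : List Int) then (1 : Int) else 0)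
        (PySem.List.pyRange 0 12 1) :=
    List.map_congr_left (fun s _ => by rw [pv_mod_shift])
  rw [hmap]
  generalize PySem.Int.mod p 12 = q at h0 h1
  interval_cases q <;> decide

lemma pv_scatter_mercury (p : Int) :
    calculate_bindus_for_contributor p ([1, 3, 5, 6, 7, 9, 10, 11] : List Int) =
      List.map (fun s => if PySem.Int.mod (s - p) 12 + 1 ∈ ([1, 3, 5, 6, 7, 9, 10, 11] : List Int) then (1 : Int) else 0)
        (PySem.List.pyRange 0 12 1) := by
  rw [pv_scatter_mod]
  have h0 : 0 ≤ PySem.Int.mod p 12 := PySem.Int.mod_nonneg p (by norm_num)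
  have h1 : PySem.Int.mod p 12 < 12 := PySem.Int.mod_lt p (by norm_num)
  have hmap :
      List.map (fun s => if PySem.Int.mod (s - p) 12 + 1 ∈ ([1, 3, 5, 6, 7, 9, 10, 11] : List Int) then (1 : Int) else 0)
        (PySem.List.pyRange 0 12 1) =
      List.map (fun s => if PySem.Int.mod (s - PySem.Int.mod p 12) 12 + 1 ∈ ([1, 3, 5, 6, 7, 9, 10, 11] : List Int) then (1 : Int) else 0)
        (PySem.List.pyRange 0 12 1) :=
    List.map_congr_left (fun s _ => by rw [pv_mod_shift])
  rw [hmap]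
  generalize PySem.Int.mod p 12 = q at h0 h1
  interval_cases q <;> decide

lemma pv_scatter_jupiter (p : Int) :
    calculate_bindus_for_contributor p ([1, 2, 3, 4, 7, 8, 10, 11] : List Int) =
      List.map (fun s => if PySem.Int.mod (s - p) 12 + 1 ∈ ([1, 2, 3, 4, 7, 8, 10, 11] : List Int) then (1 : Int) else 0)
        (PySem.List.pyRange 0 12 1) := by
  rw [pv_scatter_mod]
  have h0 : 0 ≤ PySem.Int.mod p 12 := PySem.Int.mod_nonneg p (by norm_num)
  have h1 : PySem.Int.mod p 12 < 12 := PySem.Int.mod_lt p (by norm_num)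
  have hmap :
      List.map (fun s => if PySem.Int.mod (s - p) 12 + 1 ∈ ([1, 2, 3, 4, 7, 8, 10, 11] : List Int) then (1 : Int) else 0)
        (PySem.List.pyRange 0 12 1) =
      List.map (fun s => if PySem.Int.mod (s - PySem.Int.mod p 12) 12 + 1 ∈ ([1, 2, 3, 4, 7, 8, 10, 11] : List Int) then (1 : Int) else 0)
        (PySem.List.pyRange 0 12 1) :=
    List.map_congr_left (fun s _ => by rw [pv_mod_shift])
  rw [hmap]
  generalize PySem.Int.mod p 12 = q at h0 h1
  interval_cases q <;> decide

lemma pv_scatter_venus (p : Int) :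
    calculate_bindus_for_contributor p ([1, 2, 3, 4, 5, 8, 9, 11] : List Int) =
      List.map (fun s => if PySem.Int.mod (s - p) 12 + 1 ∈ ([1, 2, 3, 4, 5, 8, 9, 11] : List Int) then (1 : Int) else 0)
        (PySem.List.pyRange 0 12 1) := by
  rw [pv_scatter_mod]
  have h0 : 0 ≤ PySem.Int.mod p 12 := PySem.Int.mod_nonneg p (by norm_num)
  have h1 : PySem.Int.mod p 12 < 12 := PySem.Int.mod_lt p (by norm_num)
  have hmap :
      List.map (fun s => if PySem.Int.mod (s - p) 12 + 1 ∈ ([1, 2, 3, 4, 5, 8, 9, 11] : List Int) then (1 : Int) else 0)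
        (PySem.List.pyRange 0 12 1) =
      List.map (fun s => if PySem.Int.mod (s - PySem.Int.mod p 12) 12 + 1 ∈ ([1, 2, 3, 4, 5, 8, 9, 11] : List Int) then (1 : Int) else 0)
        (PySem.List.pyRange 0 12 1) :=
    List.map_congr_left (fun s _ => by rw [pv_mod_shift])
  rw [hmap]
  generalize PySem.Int.mod p 12 = q at h0 h1
  interval_cases q <;> decide

lemma pv_scatter_saturn (p : Int) :
    calculate_bindus_for_contributor p ([1, 3, 6, 11] : List Int) =
      List.map (fun s => if PySem.Int.mod (s - p) 12 + 1 ∈ ([1, 3, 6, 11] : List Int) then (1 : Int) else 0)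
        (PySem.List.pyRange 0 12 1) := by
  rw [pv_scatter_mod]
  have h0 : 0 ≤ PySem.Int.mod p 12 := PySem.Int.mod_nonneg p (by norm_num)
  have h1 : PySem.Int.mod p 12 < 12 := PySem.Int.mod_lt p (by norm_num)
  have hmap :
      List.map (fun s => if PySem.Int.mod (s - p) 12 + 1 ∈ ([1, 3, 6, 11] : List Int) then (1 : Int) else 0)
        (PySem.List.pyRange 0 12 1) =
      List.map (fun s => if PySem.Int.mod (s - PySem.Int.mod p 12) 12 + 1 ∈ ([1, 3, 6, 11] : List Int) then (1 : Int) else 0)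
        (PySem.List.pyRange 0 12 1) :=
    List.map_congr_left (fun s _ => by rw [pv_mod_shift])
  rw [hmap]
  generalize PySem.Int.mod p 12 = q at h0 h1
  interval_cases q <;> decide


lemma pv_repl : (List.replicate 12 (0 : Int)) = List.map (fun _ => (0 : Int)) (PySem.List.pyRange 0 12 1) := rfl

lemma pv_rangeAdd (f g : Int → Int) :
    (PySem.List.pyRange 0 12 1).foldl
      (fun pb i => pb.set i.toNat (pb.getD i.toNat 0 + (List.map g (PySem.List.pyRange 0 12 1)).getD i.toNat 0))
      (List.map f (PySem.List.pyRange 0 12 1))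
    = List.map (fun s => f s + g s) (PySem.List.pyRange 0 12 1) := rfl

lemma pv_count_step (c : Prop) [Decidable c] (x : Int) :
    (if c then x + 1 else x) = x + (if c then (1 : Int) else 0) := by
  by_cases h : c <;> simp [h]


lemma pvT_sun : PySem.Dict.getD PLANET_BENEFIC_HOUSES "sun" [] = ([1, 2, 4, 7, 8, 9, 10, 11] : List Int) := rfl
lemma pvB_sun : PySem.Dict.getD pvBeneficLit "sun" [] = ([1, 2, 4, 7, 8, 9, 10, 11] : List Int) := rfl

lemma pvT_moon : PySem.Dict.getD PLANET_BENEFIC_HOUSES "moon" [] = ([1, 3, 6, 7, 8, 10, 11] : List Int) := rfl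
lemma pvB_moon : PySem.Dict.getD pvBeneficLit "moon" [] = ([1, 3, 6, 7, 8, 10, 11] : List Int) := rfl

lemma pvT_mars : PySem.Dict.getD PLANET_BENEFIC_HOUSES "mars" [] = ([1, 3, 6, 10, 11] : List Int) := rfl
lemma pvB_mars : PySem.Dict.getD pvBeneficLit "mars" [] = ([1, 3, 6, 10, 11] : List Int) := rfl

lemma pvT_mercury : PySem.Dict.getD PLANET_BENEFIC_HOUSES "mercury" [] = ([1, 3, 5, 6, 7, 9, 10, 11] : List Int) := rfl
lemma pvB_mercury : PySem.Dict.getD pvBeneficLit "mercury" [] = ([1, 3, 5, 6, 7, 9, 10, 11] : List Int) := rfl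

lemma pvT_jupiter : PySem.Dict.getD PLANET_BENEFIC_HOUSES "jupiter" [] = ([1, 2, 3, 4, 7, 8, 10, 11] : List Int) := rfl
lemma pvB_jupiter : PySem.Dict.getD pvBeneficLit "jupiter" [] = ([1, 2, 3, 4, 7, 8, 10, 11] : List Int) := rfl

lemma pvT_venus : PySem.Dict.getD PLANET_BENEFIC_HOUSES "venus" [] = ([1, 2, 3, 4, 5, 8, 9, 11] : List Int) := rfl
lemma pvB_venus : PySem.Dict.getD pvBeneficLit "venus" [] = ([1, 2, 3, 4, 5, 8, 9, 11] : List Int) := rfl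

lemma pvT_saturn : PySem.Dict.getD PLANET_BENEFIC_HOUSES "saturn" [] = ([1, 3, 6, 11] : List Int) := rfl
lemma pvB_saturn : PySem.Dict.getD pvBeneficLit "saturn" [] = ([1, 3, 6, 11] : List Int) := rfl

lemma pvT_asc : PySem.Dict.getD PLANET_BENEFIC_HOUSES "ascendant" [] = ([1, 2, 3, 4, 7, 8, 10, 11] : List Int) := rfl
lemma pvB_asc : PySem.Dict.getD pvBeneficLit "ascendant" [] = ([1, 2, 3, 4, 7, 8, 10, 11] : List Int) := rfl


lemma pv_key (v1 v2 v3 v4 v5 v6 v7 v8 : Int) :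
    pvAB v1 v2 v3 v4 v5 v6 v7 v8 = pvV v1 v2 v3 v4 v5 v6 v7 v8 := by
  unfold pvAB pvV pvItems
  simp only [List.foldl, pvT_sun, pvT_moon, pvT_mars, pvT_mercury, pvT_jupiter, pvT_venus,
    pvT_saturn, pvT_asc, pvB_sun, pvB_moon, pvB_mars, pvB_mercury, pvB_jupiter, pvB_venus,
    pvB_saturn, pvB_asc]
  simp only [pv_scatter_sun, pv_scatter_moon, pv_scatter_mars, pv_scatter_mercury,
    pv_scatter_jupiter, pv_scatter_venus, pv_scatter_saturn]
  simp only [pv_repl, pv_rangeAdd, pv_count_step]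
  rfl

-- ===== VERDICT (by name: the statement is the Claim_ definition above) =====
theorem get_bhinnashtakavarga_spec : Claim_equal_get_bhinnashtakavarga := by
  intro P H _
  unfold Spec_get_bhinnashtakavarga
  rw [pv_A_shape, pv_B_shape, pv_key]
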